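-- pv_equiv track=rewrite | github.com/MrBrantCode/unitest_baseline | mut_generate/mist_train_taco/taco_16725/solution.py | maximize_sum_of_min_elements
-- ===== SOURCE A (Python) =====
-- def maximize_sum_of_min_elements(A, B):
--     """
--     Rearranges the array A to maximize the sum of the minimal elements of k-element subsets.
--
--     Parameters:
--     A (list of int): The first array of integers.
--     B (list of int): The second array of integers, where each element is less than or equal to the corresponding element in A.
--
--     Returns:
--     list of int: The rearranged array A'.
--     """
--     A.sort()
--     A.reverse()
--
--     # Create a list of tuples (b_i, index) and sort it by b_i
--     indexed_B = [(b, i) for i, b in enumerate(B)]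
--     indexed_B.sort()
--
--     # Create the result array
--     result = [0] * len(A)
--
--     # Fill the result array with the sorted elements of A based on the sorted indexed_B
--     for i, (_, index) in enumerate(indexed_B):
--         result[index] = A[i]
--
--     return result
-- ===== SOURCE B (Python) =====
-- def maximize_sum_of_min_elements(A, B):
--     """Counting-rank version: sort A descending in place, then give each
--     position i its rank among B directly (values smaller than B[i], plus
--     earlier equal ones) and fill the rearranged array positionally --
--     no sorting of B's (value, index) pairs at all."""
--     A.sort(reverse=True)
--     result = [0] * len(A)
--     for i, b in enumerate(B):
--         result[i] = A[sum(x < b for x in B) + B[:i].count(b)]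
--     return result
-- ===== Notes on version B (the rewrite author's own statement) =====
-- stated objective: alternative
-- what changed: Instead of sorting B's (value,index) pairs and scattering the descending A by the stored indices, B computes each position's rank directly by counting strictly-smaller and earlier-equal elements of B and fills the rearranged array positionally, with no sort of B at all; Pre_ excludes len(B) > len(A), where A raises IndexError (B raises there too).
import Mathlib
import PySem

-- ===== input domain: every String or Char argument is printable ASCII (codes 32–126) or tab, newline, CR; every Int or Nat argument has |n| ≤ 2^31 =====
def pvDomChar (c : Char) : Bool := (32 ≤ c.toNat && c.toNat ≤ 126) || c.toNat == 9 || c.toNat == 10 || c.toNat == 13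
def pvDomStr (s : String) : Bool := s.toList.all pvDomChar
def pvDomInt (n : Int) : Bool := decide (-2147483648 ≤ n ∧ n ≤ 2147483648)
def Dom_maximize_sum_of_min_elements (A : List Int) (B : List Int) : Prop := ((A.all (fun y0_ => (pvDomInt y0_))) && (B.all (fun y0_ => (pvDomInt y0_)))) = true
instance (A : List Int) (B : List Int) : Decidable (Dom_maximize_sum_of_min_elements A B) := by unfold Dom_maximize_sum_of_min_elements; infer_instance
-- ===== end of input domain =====

-- B replaces the sort-B-then-scatter-by-stored-index of A by direct counting ranks and a positional
-- fill (alternative algorithm, not faster). Both A and the Python B sort the argument A descending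
-- IN PLACE, the same observable side effect; the theorems below are about the return value.

-- ===== PORT A =====
def maximize_sum_of_min_elements (A : List Int) (B : List Int) : List Int :=
  -- A.sort(); A.reverse()
  let As := (PySem.List.sorted A (fun x => x) false).reverse
  -- indexed_B = [(b, i) for i, b in enumerate(B)]; indexed_B.sort()  (tuple sort: sorted2)
  let indexedB := PySem.List.sorted2 ((PySem.List.enumerate B).map (fun p => (p.2, p.1)))
      (fun p => p.1) (fun p => p.2) false
  -- result = [0] * len(A); for i, (_, index) in enumerate(indexed_B): result[index] = A[i]
  (PySem.List.enumerate indexedB).foldl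
    (fun res q => PySem.List.pySetD res q.2.2 (PySem.List.pyGetD As q.1 0))
    (List.replicate A.length 0)

-- ===== PORT B =====
def maximize_sum_of_min_elements_alt (A : List Int) (B : List Int) : List Int :=
  -- A.sort(reverse=True)
  let As := PySem.List.sorted A (fun x => x) true
  -- result = [0] * len(A)
  -- for i, b in enumerate(B): result[i] = A[sum(x < b for x in B) + B[:i].count(b)]
  (PySem.List.enumerate B).foldl
    (fun res p => PySem.List.pySetD res p.1
      (PySem.List.pyGetD As
        ((B.map (fun x => if x < p.2 then (1 : Int) else 0)).sum +
         (PySem.List.count (PySem.List.slice B none (some p.1)) p.2 : Int)) 0))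
    (List.replicate A.length 0)

-- ===== PRECONDITION & SPEC =====
-- Pre_ excludes exactly the inputs with len(B) > len(A), on which Python A raises IndexError
-- (result[index] / A[i] out of range); Python B raises IndexError there too.
def Pre_maximize_sum_of_min_elements (A : List Int) (B : List Int) : Prop :=
  B.length ≤ A.length
instance (A : List Int) (B : List Int) : Decidable (Pre_maximize_sum_of_min_elements A B) := by
  unfold Pre_maximize_sum_of_min_elements; infer_instance

def pvWitness_maximize_sum_of_min_elements : List Int × List Int := ([3, 1, 2], [5, 4, 6])

def Spec_maximize_sum_of_min_elements (A : List Int) (B : List Int) (out : List Int) : Prop :=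
  out = maximize_sum_of_min_elements_alt A B
instance (A : List Int) (B : List Int) (out : List Int) :
    Decidable (Spec_maximize_sum_of_min_elements A B out) := by
  unfold Spec_maximize_sum_of_min_elements; infer_instance

-- ===== CLAIM (what is proved, stated in full; the proofs are below) =====
def Claim_equal_maximize_sum_of_min_elements : Prop :=
  ∀ (A : List Int) (B : List Int), Dom_maximize_sum_of_min_elements A B →
    Pre_maximize_sum_of_min_elements A B →
    Spec_maximize_sum_of_min_elements A B (maximize_sum_of_min_elements A B)

-- ===== LEMMAS AND PROOFS =====

lemma pv_desc_sorted_eq (A : List Int) :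
    (PySem.List.sorted A (fun x => x) false).reverse = PySem.List.sorted A (fun x => x) true := by
  have hperm : (PySem.List.sorted A (fun x => x) false).reverse.Perm
      (PySem.List.sorted A (fun x => x) true) :=
    ((List.reverse_perm _).trans (PySem.List.sorted_perm A (fun x => x) false)).trans
      (PySem.List.sorted_perm A (fun x => x) true).symm
  exact List.Perm.eq_of_pairwise (le := fun a b : Int => b ≤ a)
    (fun a b _ _ h1 h2 => le_antisymm h2 h1)
    ((List.pairwise_reverse).mpr ((PySem.List.sorted_pairwise A (fun x => x)).imp (fun h => h)))
    (PySem.List.sorted_pairwise_rev A (fun x => x)) hperm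

lemma pv_sorted2_eq_sorted_lex (xs : List (Int × Int)) :
    PySem.List.sorted2 xs (fun p => p.1) (fun p => p.2) false
      = PySem.List.sorted xs (fun p => toLex p) false := by
  have hcomp : (fun (a b : Int × Int) =>
        (decide (a.1 < b.1) || (!decide (b.1 < a.1) && decide (a.2 < b.2))))
      = (fun (a b : Int × Int) => decide (toLex a < toLex b)) := by
    funext a b
    rcases lt_trichotomy a.1 b.1 with h | h | h
    · simp [Prod.Lex.lt_iff, h]
    · simp [Prod.Lex.lt_iff, h]
    · simp [Prod.Lex.lt_iff, h, not_lt_of_gt h, ne_of_gt h]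
  simp only [PySem.List.sorted2, PySem.List.sorted, if_neg (by decide : ¬ (false = true))]
  rw [hcomp]

lemma pv_countP_lt_getElem {α κ : Type} [LinearOrder κ] (key : α → κ) :
    ∀ (l : List α), l.Pairwise (fun a b => key a < key b) →
      ∀ (k : Nat) (hk : k < l.length),
        l.countP (fun y => decide (key y < key l[k])) = k := by
  intro l
  induction l with
  | nil => intro _ k hk; simp at hk
  | cons x t ih =>
    intro hp k hk
    have hx : ∀ y ∈ t, key x < key y := fun y hy => (List.pairwise_cons.mp hp).1 y hy
    have ht : t.Pairwise (fun a b => key a < key b) := (List.pairwise_cons.mp hp).2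
    cases k with
    | zero =>
      simp only [List.getElem_cons_zero, List.countP_cons]
      rw [List.countP_eq_zero.mpr (fun y hy => by simp [not_lt_of_gt (hx y hy)]),
        if_neg (by simp)]
    | succ k =>
      have hk' : k < t.length := by simpa using hk
      rw [List.countP_cons]
      have h2 : List.countP (fun y => decide (key y < key (x :: t)[k + 1])) t = k :=
        ih ht k hk'
      have h3 : key x < key (x :: t)[k + 1] := hx _ (List.getElem_mem hk')
      rw [h2, if_pos (decide_eq_true h3)]

lemma pv_countP_enumerate_lt (v : Int) :
    ∀ (t : List Int) (s : Int),
      (PySem.List.enumerate t s).countP (fun p => decide (p.2 < v))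
        = t.countP (fun b => decide (b < v)) := by
  intro t
  induction t with
  | nil => intro s; simp [PySem.List.enumerate_nil]
  | cons y u ihu =>
    intro s
    rw [PySem.List.enumerate_cons, List.countP_cons, List.countP_cons, ihu]

lemma pv_countP_enumerate_lex (v : Int) :
    ∀ (B : List Int) (s : Int) (j : Nat),
      (PySem.List.enumerate B s).countP
          (fun p => decide (p.2 < v ∨ (p.2 = v ∧ p.1 < s + (j : Int))))
        = B.countP (fun b => decide (b < v)) + (B.take j).countP (fun b => decide (b = v)) := by
  intro B
  induction B with
  | nil => intro s j; simp [PySem.List.enumerate_nil]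
  | cons x t ih =>
    intro s j
    rw [PySem.List.enumerate_cons, List.countP_cons, List.countP_cons]
    cases j with
    | zero =>
      have htail : (PySem.List.enumerate t (s + 1)).countP
            (fun p => decide (p.2 < v ∨ (p.2 = v ∧ p.1 < s + ((0 : Nat) : Int)))) =
          (PySem.List.enumerate t (s + 1)).countP (fun p => decide (p.2 < v)) := by
        apply List.countP_congr
        intro p hp
        obtain ⟨k, hk, rfl⟩ := (PySem.List.mem_enumerate_iff t (s + 1) p).mp hp
        simp only [decide_eq_true_eq]
        constructor
        · rintro (h | ⟨-, h⟩)
          · exact h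
          · exfalso; push_cast at h; omega
        · exact fun h => Or.inl h
      rw [htail, pv_countP_enumerate_lt]
      simp only [List.take_zero, List.countP_nil]
      have : (decide ((s, x).2 < v ∨ ((s, x).2 = v ∧ (s, x).1 < s + ((0 : Nat) : Int))))
          = decide (x < v) := by simp
      rw [this]
      omega
    | succ j =>
      have hstep : (PySem.List.enumerate t (s + 1)).countP
            (fun p => decide (p.2 < v ∨ (p.2 = v ∧ p.1 < s + ((j + 1 : Nat) : Int)))) =
          (PySem.List.enumerate t (s + 1)).countP
            (fun p => decide (p.2 < v ∨ (p.2 = v ∧ p.1 < (s + 1) + ((j : Nat) : Int)))) := by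
        apply List.countP_congr
        intro p hp
        have : s + ((j + 1 : Nat) : Int) = (s + 1) + (j : Int) := by push_cast; ring
        rw [this]
      rw [hstep, ih (s + 1) j]
      have hhead : (decide ((s, x).2 < v ∨ ((s, x).2 = v ∧ (s, x).1 < s + ((j + 1 : Nat) : Int))))
          = (decide (x < v) || decide (x = v)) := by
        by_cases h1 : x < v <;> by_cases h2 : x = v <;> simp [h1, h2]
      rw [List.take_succ_cons, List.countP_cons]
      rw [hhead]
      by_cases h1 : x < v <;> by_cases h2 : x = v <;> simp [h1, h2] <;> omega

lemma pv_scatter_get_of_not_mem (W : List (Int × Int)) :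
    ∀ (init : List Int) (j : Nat),
    (∀ w ∈ W, 0 ≤ w.1) → (∀ w ∈ W, w.1 ≠ (j : Int)) →
    (W.foldl (fun res w => PySem.List.pySetD res w.1 w.2) init)[j]? = init[j]? := by
  induction W with
  | nil => intro init j _ _; rfl
  | cons w t ih =>
    intro init j hpos hne
    rw [List.foldl_cons, ih _ j (fun w hw => hpos w (List.mem_cons_of_mem _ hw))
      (fun w hw => hne w (List.mem_cons_of_mem _ hw))]
    rw [PySem.List.pySetD_of_nonneg init w.2 (hpos w List.mem_cons_self)]
    apply List.getElem?_set_ne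
    intro hEq
    apply hne w List.mem_cons_self
    rw [← hEq, Int.toNat_of_nonneg (hpos w List.mem_cons_self)]

lemma pv_scatter_get_of_mem (W : List (Int × Int)) :
    ∀ (init : List Int) (j : Nat) (v : Int),
    (∀ w ∈ W, 0 ≤ w.1) → W.Pairwise (fun w w' => w.1 ≠ w'.1) →
    ((j : Int), v) ∈ W → j < init.length →
    (W.foldl (fun res w => PySem.List.pySetD res w.1 w.2) init)[j]? = some v := by
  induction W with
  | nil => intro init j v _ _ hmem _; simp at hmem
  | cons w t ih =>
    intro init j v hpos hpw hmem hj
    rcases List.mem_cons.mp hmem with heq | hmem'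
    · -- the head is the (unique) write to j; the tail never writes j again
      subst heq
      rw [List.foldl_cons]
      have hnot : ∀ w' ∈ t, w'.1 ≠ (j : Int) :=
        fun w' hw' => Ne.symm ((List.pairwise_cons.mp hpw).1 w' hw')
      rw [pv_scatter_get_of_not_mem t _ j (fun w hw => hpos w (List.mem_cons_of_mem _ hw)) hnot]
      rw [PySem.List.pySetD_of_nonneg init v (Int.natCast_nonneg j)]
      rw [Int.toNat_natCast]
      exact List.getElem?_set_self hj
    · rw [List.foldl_cons]
      apply ih _ j v (fun w hw => hpos w (List.mem_cons_of_mem _ hw))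
        (List.pairwise_cons.mp hpw).2 hmem'
      rw [PySem.List.length_pySetD]
      exact hj

lemma pv_map_sndsnd_enumerate : ∀ (l : List (Int × Int)) (s : Int),
    (PySem.List.enumerate l s).map (fun q => q.2.2) = l.map (fun p => p.2) := by
  intro l
  induction l with
  | nil => intro s; simp [PySem.List.enumerate_nil]
  | cons x t ih => intro s; rw [PySem.List.enumerate_cons, List.map_cons, List.map_cons, ih]

-- the 0/1 generator-sum in B is the strict count
lemma pv_sum_ite_eq_countP (B : List Int) (v : Int) :
    (B.map (fun x => if x < v then (1 : Int) else 0)).sum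
      = (B.countP (fun b => decide (b < v)) : Int) := by
  induction B with
  | nil => simp
  | cons x t ih =>
    rw [List.map_cons, List.sum_cons, List.countP_cons, ih]
    by_cases h : x < v <;> simp [h] <;> omega

lemma pv_main (A B : List Int) (h : B.length ≤ A.length) :
    maximize_sum_of_min_elements A B = maximize_sum_of_min_elements_alt A B := by
  simp only [maximize_sum_of_min_elements, maximize_sum_of_min_elements_alt]
  rw [pv_sorted2_eq_sorted_lex, pv_desc_sorted_eq]
  set AS := PySem.List.sorted A (fun x => x) true with hAS
  set P := (PySem.List.enumerate B).map (fun p : Int × Int => (p.2, p.1)) with hP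
  set S := PySem.List.sorted P (fun p => toLex p) false with hS
  -- both folds, rewritten as scatters of explicit (index, value) write lists
  have hfoldA : (PySem.List.enumerate S).foldl
      (fun res q => PySem.List.pySetD res q.2.2 (PySem.List.pyGetD AS q.1 0))
      (List.replicate A.length 0)
      = ((PySem.List.enumerate S).map (fun q => (q.2.2, PySem.List.pyGetD AS q.1 0))).foldl
        (fun res w => PySem.List.pySetD res w.1 w.2) (List.replicate A.length 0) := by
    rw [List.foldl_map]
  have hfoldB : (PySem.List.enumerate B).foldl
      (fun res p => PySem.List.pySetD res p.1
        (PySem.List.pyGetD AS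
          ((B.map (fun x => if x < p.2 then (1 : Int) else 0)).sum +
           (PySem.List.count (PySem.List.slice B none (some p.1)) p.2 : Int)) 0))
      (List.replicate A.length 0)
      = ((PySem.List.enumerate B).map (fun p => (p.1,
          PySem.List.pyGetD AS
            ((B.map (fun x => if x < p.2 then (1 : Int) else 0)).sum +
             (PySem.List.count (PySem.List.slice B none (some p.1)) p.2 : Int)) 0))).foldl
        (fun res w => PySem.List.pySetD res w.1 w.2) (List.replicate A.length 0) := by
    rw [List.foldl_map]
  rw [hfoldA, hfoldB]
  set W := (PySem.List.enumerate S).map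
      (fun q : Int × (Int × Int) => (q.2.2, PySem.List.pyGetD AS q.1 0)) with hW
  set V := (PySem.List.enumerate B).map (fun p : Int × Int => (p.1,
      PySem.List.pyGetD AS
        ((B.map (fun x => if x < p.2 then (1 : Int) else 0)).sum +
         (PySem.List.count (PySem.List.slice B none (some p.1)) p.2 : Int)) 0)) with hV
  -- basic lengths
  have hPlen : P.length = B.length := by
    rw [hP, List.length_map, PySem.List.length_enumerate]
  have hSlen : S.length = B.length := by
    rw [hS, PySem.List.length_sorted, hPlen]
  have hSperm : S.Perm P := PySem.List.sorted_perm P (fun p => toLex p) false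
  -- every element of S is (B[k], k) for some k < |B|
  have hSmem : ∀ p ∈ S, ∃ (k : Nat) (hk : k < B.length), p = (B[k], (k : Int)) := by
    intro p hp
    have hp' : p ∈ P := (PySem.List.mem_sorted P (fun p => toLex p) false p).mp hp
    rw [hP] at hp'
    obtain ⟨x, hx, rfl⟩ := List.mem_map.mp hp'
    obtain ⟨k, hk, rfl⟩ := (PySem.List.mem_enumerate_iff B 0 x).mp hx
    exact ⟨k, hk, by simp⟩
  -- the write targets of W are pairwise distinct, nonnegative, < |B|
  have hWfst : W.map (fun w => w.1) = S.map (fun p => p.2) := by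
    rw [hW, List.map_map, ← pv_map_sndsnd_enumerate S 0]
    rfl
  have hPpw : P.Pairwise (fun p q : Int × Int => p.2 < q.2) := by
    rw [hP]
    exact List.Pairwise.map _ (fun a b hab => hab) (PySem.List.pairwise_lt_enumerate B 0)
  have hPsnd_nodup : (P.map (fun p => p.2)).Nodup :=
    (List.pairwise_map.mpr hPpw).imp (fun hab => ne_of_lt hab)
  have hSsnd_nodup : (S.map (fun p => p.2)).Nodup :=
    ((hSperm.map (fun p => p.2)).nodup_iff).mpr hPsnd_nodup
  have hWpw : W.Pairwise (fun w w' => w.1 ≠ w'.1) :=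
    List.pairwise_map.mp (hWfst ▸ hSsnd_nodup)
  have hWpos : ∀ w ∈ W, 0 ≤ w.1 := by
    intro w hw
    rw [hW] at hw
    obtain ⟨q, hq, rfl⟩ := List.mem_map.mp hw
    obtain ⟨k, hk, rfl⟩ := (PySem.List.mem_enumerate_iff S 0 q).mp hq
    obtain ⟨k', hk', hEq⟩ := hSmem S[k] (List.getElem_mem hk)
    simp only [hEq]
    exact Int.natCast_nonneg k'
  have hWlt : ∀ w ∈ W, w.1 < (B.length : Int) := by
    intro w hw
    rw [hW] at hw
    obtain ⟨q, hq, rfl⟩ := List.mem_map.mp hw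
    obtain ⟨k, hk, rfl⟩ := (PySem.List.mem_enumerate_iff S 0 q).mp hq
    obtain ⟨k', hk', hEq⟩ := hSmem S[k] (List.getElem_mem hk)
    simp only [hEq]
    exact_mod_cast hk'
  -- the write targets of V are 0,1,…,|B|-1 in order
  have hVpos : ∀ w ∈ V, 0 ≤ w.1 := by
    intro w hw
    rw [hV] at hw
    obtain ⟨p, hp, rfl⟩ := List.mem_map.mp hw
    obtain ⟨k, hk, rfl⟩ := (PySem.List.mem_enumerate_iff B 0 p).mp hp
    simp
  have hVlt : ∀ w ∈ V, w.1 < (B.length : Int) := by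
    intro w hw
    rw [hV] at hw
    obtain ⟨p, hp, rfl⟩ := List.mem_map.mp hw
    obtain ⟨k, hk, rfl⟩ := (PySem.List.mem_enumerate_iff B 0 p).mp hp
    simpa using hk
  have hVpw : V.Pairwise (fun w w' => w.1 ≠ w'.1) := by
    rw [hV]
    exact List.Pairwise.map _ (fun a b hab => ne_of_lt hab)
      (PySem.List.pairwise_lt_enumerate B 0)
  apply List.ext_getElem?
  intro j
  by_cases hj1 : j < B.length
  · -- in the written range: both scatters hold A-descending at the rank of (B[j], j)
    -- (B[j], j) occurs in S, say at position k
    have hmemP : ((B[j], (j : Int)) : Int × Int) ∈ P := by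
      rw [hP]
      refine List.mem_map.mpr ⟨((j : Int), B[j]), ?_, rfl⟩
      exact (PySem.List.mem_enumerate_iff B 0 _).mpr ⟨j, hj1, by simp⟩
    have hmemS : ((B[j], (j : Int)) : Int × Int) ∈ S :=
      (PySem.List.mem_sorted P (fun p => toLex p) false _).mpr hmemP
    obtain ⟨k, hk, hSk⟩ := List.mem_iff_getElem.mp hmemS
    -- strict lexicographic pairwise order on S
    have hSnodup : S.Nodup := List.Nodup.of_map _ hSsnd_nodup
    have hSlt : S.Pairwise (fun a b => toLex a < toLex b) := by
      refine ((PySem.List.sorted_pairwise P (fun p => toLex p)).and hSnodup).imp ?_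
      rintro a b ⟨hle, hne⟩
      exact lt_of_le_of_ne hle (fun hEq => hne (Prod.ext (congrArg Prod.fst hEq) (congrArg Prod.snd hEq)))
    -- k is the number of lexicographically smaller pairs, i.e. B's counting rank of j
    have hcount := pv_countP_lt_getElem (fun p : Int × Int => toLex p) S hSlt k hk
    rw [hSk, hSperm.countP_eq] at hcount
    rw [hP, List.countP_map] at hcount
    have hcongr : (PySem.List.enumerate B 0).countP
          ((fun y : Int × Int => decide (toLex y < toLex ((B[j], (j : Int)) : Int × Int)))
            ∘ (fun p : Int × Int => (p.2, p.1)))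
        = (PySem.List.enumerate B 0).countP
          (fun p => decide (p.2 < B[j] ∨ (p.2 = B[j] ∧ p.1 < 0 + (j : Int)))) := by
      apply List.countP_congr
      intro p hp
      simp only [Function.comp_apply, decide_eq_true_eq, Prod.Lex.lt_iff, zero_add]
      constructor
      · rintro (hlt | ⟨hEq, hlt⟩)
        · exact Or.inl hlt
        · exact Or.inr ⟨hEq, hlt⟩
      · rintro (hlt | ⟨hEq, hlt⟩)
        · exact Or.inl hlt
        · exact Or.inr ⟨hEq, hlt⟩
    rw [hcongr, pv_countP_enumerate_lex B[j] B 0 j] at hcount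
    -- the A-side scatter writes pyGetD AS k at position j
    have hW0 : (((j : Int), PySem.List.pyGetD AS (k : Int) 0) : Int × Int) ∈ W := by
      rw [hW]
      refine List.mem_map.mpr ⟨((0 : Int) + (k : Int), S[k]), ?_, ?_⟩
      · exact (PySem.List.mem_enumerate_iff S 0 _).mpr ⟨k, hk, rfl⟩
      · rw [hSk]; norm_num
    rw [pv_scatter_get_of_mem W _ j (PySem.List.pyGetD AS (k : Int) 0) hWpos hWpw hW0
      (by rw [List.length_replicate]; omega)]
    -- the B-side scatter writes the counting-rank element at position j
    have hV0 : (((j : Int),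
        PySem.List.pyGetD AS
          ((B.map (fun x => if x < B[j] then (1 : Int) else 0)).sum +
           (PySem.List.count (PySem.List.slice B none (some ((j : Int)))) B[j] : Int)) 0)
        : Int × Int) ∈ V := by
      rw [hV]
      refine List.mem_map.mpr ⟨((0 : Int) + (j : Int), B[j]), ?_, ?_⟩
      · exact (PySem.List.mem_enumerate_iff B 0 _).mpr ⟨j, hj1, rfl⟩
      · norm_num
    rw [pv_scatter_get_of_mem V _ j _ hVpos hVpw hV0
      (by rw [List.length_replicate]; omega)]
    -- the two written values agree: the sorted rank k equals the counting rank
    congr 2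
    rw [pv_sum_ite_eq_countP, PySem.List.slice_to_natCast B j, PySem.List.count_eq,
      List.count_eq_countP]
    have hc2 : (B.take j).countP (fun b => b == B[j])
        = (B.take j).countP (fun b => decide (b = B[j])) := by
      apply List.countP_congr
      intro b _
      simp
    rw [hc2, ← hcount]
    push_cast
    ring
  · -- beyond |B| (or out of range): neither scatter writes; both stay replicate 0
    have hneW : ∀ w ∈ W, w.1 ≠ (j : Int) := by
      intro w hw hc
      have hlt := hWlt w hw
      rw [hc] at hlt
      have : j < B.length := by exact_mod_cast hlt
      omega
    have hneV : ∀ w ∈ V, w.1 ≠ (j : Int) := by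
      intro w hw hc
      have hlt := hVlt w hw
      rw [hc] at hlt
      have : j < B.length := by exact_mod_cast hlt
      omega
    rw [pv_scatter_get_of_not_mem W _ j hWpos hneW,
      pv_scatter_get_of_not_mem V _ j hVpos hneV]

-- ===== VERDICT (by name: the statement is the Claim_ definition above) =====
theorem maximize_sum_of_min_elements_spec : Claim_equal_maximize_sum_of_min_elements := by
  intro A B _ hpre
  exact pv_main A B hpre
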